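-- pv_equiv track=rewrite | github.com/glenfs/beet-v1 | code_bk/preprocess_satb.py | add_fermata
-- ===== SOURCE A (Python) =====
-- def add_fermata(encoded_voice, fermata=None):
--     tokens = encoded_voice.split()
--     target_len = len(tokens)
--
--     if fermata is None:
--         fermata_list = [0] * target_len
--     else:
--         if isinstance(fermata, str):
--             fermata_list = [int(x) for x in fermata.split()] if fermata else []
--         else:
--             fermata_list = list(fermata)
--
--         if len(fermata_list) < target_len:
--             fermata_list.extend([0] * (target_len - len(fermata_list)))
--         elif len(fermata_list) > target_len:
--             fermata_list = fermata_list[:target_len]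
--
--     last_note = None
--     for i, t in enumerate(tokens):
--         if t.isdigit():
--             last_note = i
--
--     if last_note is not None:
--         for i in range(last_note, len(tokens)):
--             fermata_list[i] = 1
--
--     return " ".join(map(str, fermata_list))
-- ===== SOURCE B (Python) =====
-- def add_fermata(encoded_voice, fermata=None):
--     tokens = encoded_voice.split()
--     if fermata is None or not fermata:
--         vals = []
--     else:
--         vals = [int(x) for x in fermata.split()]
--     it = iter(vals)
--     out = []      # committed parts: positions strictly before the last digit token seen so far
--     pend = []     # values for positions at/after the last digit token seen so far (or all, if none yet)
--     seen = False
--     for t in tokens: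
--         v = next(it, 0)
--         if t.isdigit():
--             out.extend(str(x) for x in pend)
--             pend = [v]
--             seen = True
--         else:
--             pend.append(v)
--     if seen:
--         parts = out + ["1"] * len(pend)
--     else:
--         parts = [str(x) for x in pend]
--     return " ".join(parts)
-- ===== Notes on version B (the rewrite author's own statement) =====
-- stated objective: alternative
-- what changed: A's three staged passes (pad/truncate the flag list to the token count, forward scan recording the last digit-token index, then a fill loop writing 1s over range(last_note, len)) are fused into a single forward pass: tokens are paired with values drawn from an iterator with default 0 (no pad/truncate list surgery), and the pass maintains a committed-output buffer plus a tentative buffer that is flushed to strings whenever a digit token appears, so the tentative suffix becomes the block of 1s at the end; no index arithmetic, slicing or in-place mutation remains.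
import Mathlib
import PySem

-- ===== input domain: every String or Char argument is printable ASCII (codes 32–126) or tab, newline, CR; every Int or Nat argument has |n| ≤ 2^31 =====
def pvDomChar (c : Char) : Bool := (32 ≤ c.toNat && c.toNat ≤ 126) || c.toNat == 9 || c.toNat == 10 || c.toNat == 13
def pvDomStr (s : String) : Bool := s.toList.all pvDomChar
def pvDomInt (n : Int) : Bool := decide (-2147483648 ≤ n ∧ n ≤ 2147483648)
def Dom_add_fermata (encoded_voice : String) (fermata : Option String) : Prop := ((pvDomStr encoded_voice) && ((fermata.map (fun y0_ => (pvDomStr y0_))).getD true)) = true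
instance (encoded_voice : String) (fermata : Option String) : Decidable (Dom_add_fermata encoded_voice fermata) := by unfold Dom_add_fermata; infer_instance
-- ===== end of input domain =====

-- B fuses A's three stages (pad/truncate the flag list, scan for the last digit token, fill a
-- range with 1s) into one forward pass that pairs tokens with values from an iterator (default 0)
-- and maintains committed/tentative output buffers flushed at each digit token (objective:
-- alternative, same cost).

-- ===== PORT A =====
def add_fermata (encoded_voice : String) (fermata : Option String) : String :=
  let tokens := PySem.Str.split₀ encoded_voice
  let target_len := tokens.length
  let fermata_list : List Int :=
    match fermata with
    | none => List.replicate target_len 0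
    | some f =>
        -- fermata is always a str here (type convention), so the isinstance branch is taken;
        -- int(x) = (ofStr? x).getD 0: Pre_ guarantees every token parses (ValueError excluded)
        let fl := if f ≠ "" then (PySem.Str.split₀ f).map (fun x => (PySem.Int.ofStr? x).getD 0) else []
        if fl.length < target_len then fl ++ List.replicate (target_len - fl.length) 0
        else if fl.length > target_len then fl.take target_len
        else fl
  let last_note : Option Int :=
    (PySem.List.enumerate tokens).foldl
      (fun acc p => if PySem.Str.strIsdigit p.2 then some p.1 else acc) none
  let fermata_list :=
    match last_note with
    | none => fermata_list
    | some ln =>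
        (PySem.List.pyRange ln (tokens.length : Int)).foldl (fun l (i : Int) => l.set i.toNat 1) fermata_list
  PySem.Str.join " " (fermata_list.map PySem.Int.toStr)

-- ===== PORT B =====
-- the iterator `it` is modelled as the list of values not yet consumed: next(it, 0) = headD 0 / tail
def add_fermata_alt (encoded_voice : String) (fermata : Option String) : String :=
  let tokens := PySem.Str.split₀ encoded_voice
  let vals : List Int :=
    match fermata with
    | none => []
    | some f =>
        -- int(x) = (ofStr? x).getD 0: Pre_ guarantees every token parses (ValueError excluded)
        if f ≠ "" then (PySem.Str.split₀ f).map (fun x => (PySem.Int.ofStr? x).getD 0) else []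
  let st := tokens.foldl
    (fun (st : List Int × List String × List Int × Bool) t =>
      let v := st.1.headD 0
      if PySem.Str.strIsdigit t then
        (st.1.tail, st.2.1 ++ st.2.2.1.map PySem.Int.toStr, [v], true)
      else
        (st.1.tail, st.2.1, st.2.2.1 ++ [v], st.2.2.2))
    (vals, ([], [], false))
  let parts :=
    if st.2.2.2 then st.2.1 ++ List.replicate st.2.2.1.length "1"
    else st.2.2.1.map PySem.Int.toStr
  PySem.Str.join " " parts

-- ===== PRECONDITION & SPEC =====
-- Pre_ excludes exactly the inputs where Python A raises ValueError: a non-None fermata string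
-- containing a whitespace-separated token that int() cannot parse (B raises the same way there).
def Pre_add_fermata (_encoded_voice : String) (fermata : Option String) : Prop :=
  (fermata.map (fun f => (PySem.Str.split₀ f).all (fun x => (PySem.Int.ofStr? x).isSome))).getD true = true
instance (encoded_voice : String) (fermata : Option String) : Decidable (Pre_add_fermata encoded_voice fermata) := by unfold Pre_add_fermata; infer_instance

def pvWitness_add_fermata : String × Option String := ("3 x 55 fer", some "1 0")

def Spec_add_fermata (encoded_voice : String) (fermata : Option String) (out : String) : Prop := out = add_fermata_alt encoded_voice fermata
instance (encoded_voice : String) (fermata : Option String) (out : String) : Decidable (Spec_add_fermata encoded_voice fermata out) := by unfold Spec_add_fermata; infer_instance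

-- ===== CLAIM (what is proved, stated in full; the proofs are below) =====
def Claim_equal_add_fermata : Prop := ∀ (encoded_voice : String) (fermata : Option String), Dom_add_fermata encoded_voice fermata → Pre_add_fermata encoded_voice fermata → Spec_add_fermata encoded_voice fermata (add_fermata encoded_voice fermata)

-- ===== LEMMAS AND PROOFS =====

-- index of the last digit token, structurally from the head (proof-only spec of both ports)
def pvLastIdx : List String → Option Nat
  | [] => none
  | x :: t =>
      match pvLastIdx t with
      | some j => some (j + 1)
      | none => if PySem.Str.strIsdigit x then some 0 else none

-- the k values produced by k calls of next(it, 0): it's first k entries padded with 0s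
def pvConsume (it : List Int) (k : Nat) : List Int :=
  it.take k ++ List.replicate (k - it.length) 0

theorem pvConsume_zero (it : List Int) : pvConsume it 0 = [] := by simp [pvConsume]

theorem pvConsume_succ (it : List Int) (k : Nat) :
    pvConsume it (k + 1) = it.headD 0 :: pvConsume it.tail k := by
  cases it with
  | nil => simp [pvConsume, List.replicate_succ]
  | cons a r =>
      simp only [pvConsume, List.take_succ_cons, List.length_cons, List.headD_cons, List.tail_cons]
      rw [show k + 1 - (r.length + 1) = k - r.length by omega]
      rfl

theorem pvConsume_length (it : List Int) (k : Nat) : (pvConsume it k).length = k := by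
  simp [pvConsume]; omega

theorem pvConsume_take (j : Nat) : ∀ (n : Nat) (it : List Int), j ≤ n →
    (pvConsume it n).take j = pvConsume it j := by
  induction j with
  | zero => intro n it _; simp [pvConsume_zero]
  | succ m ih =>
      intro n it h
      cases n with
      | zero => omega
      | succ n' =>
          rw [pvConsume_succ, pvConsume_succ, List.take_succ_cons, ih n' it.tail (by omega)]

-- A's enumerate/foldl computes pvLastIdx (shifted by the start index)
theorem pv_enum_foldl (toks : List String) (s : Int) (acc : Option Int) :
    (PySem.List.enumerate toks s).foldl
      (fun acc p => if PySem.Str.strIsdigit p.2 then some p.1 else acc) acc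
    = match pvLastIdx toks with
      | some j => some (s + (j : Int))
      | none => acc := by
  induction toks generalizing s acc with
  | nil => simp [PySem.List.enumerate, pvLastIdx]
  | cons x t ih =>
      simp only [PySem.List.enumerate, List.foldl_cons, pvLastIdx]
      rw [ih]
      cases h : pvLastIdx t with
      | some j => simp; ring
      | none => by_cases hd : PySem.Chars.strIsdigit x.toList <;> simp [hd]

theorem pv_lastIdx_lt (toks : List String) (j : Nat) (h : pvLastIdx toks = some j) :
    j < toks.length := by
  induction toks generalizing j with
  | nil => simp [pvLastIdx] at h
  | cons x t ih =>
      simp only [pvLastIdx] at h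
      cases ht : pvLastIdx t with
      | some j' =>
          rw [ht] at h
          simp only [Option.some.injEq] at h
          have := ih j' ht
          simp [← h]; omega
      | none =>
          rw [ht] at h
          by_cases hd : PySem.Str.strIsdigit x
          · rw [if_pos hd] at h
            simp only [Option.some.injEq] at h
            simp [← h]
          · rw [if_neg hd] at h; exact absurd h (by simp)

theorem pv_take_set (v : List Int) (a : Nat) (h : a < v.length) :
    (v.set a 1).take (a + 1) = v.take a ++ [1] := by
  rw [List.take_add_one, List.take_set,
    List.set_eq_of_length_le (by simp)]
  simp [h]

-- A's fill loop `for i in range(a, len): l[i] = 1` rewrites the suffix from position a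
theorem pv_fill_eq (k : Nat) : ∀ (a : Nat) (v : List Int), v.length - a = k →
    (PySem.List.pyRange (a : Int) (v.length : Int)).foldl (fun l (i : Int) => l.set i.toNat 1) v
    = v.take a ++ List.replicate (v.length - a) 1 := by
  induction k with
  | zero =>
      intro a v hk
      have hle : v.length ≤ a := by omega
      rw [show PySem.List.pyRange (a : Int) (v.length : Int) = [] by
        simp [PySem.List.pyRange]; omega]
      simp [List.take_of_length_le hle, hk]
  | succ k ih =>
      intro a v hk
      have hlt : a < v.length := by omega
      rw [PySem.List.pyRange_one_cons (by exact_mod_cast hlt)]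
      simp only [List.foldl_cons, Int.toNat_natCast]
      have hlen : (v.set a 1).length = v.length := List.length_set
      have := ih (a + 1) (v.set a 1) (by rw [hlen]; omega)
      rw [show ((a : Int) + 1) = ((a + 1 : Nat) : Int) by push_cast; ring]
      rw [show (v.length : Int) = ((v.set a 1).length : Int) by rw [hlen]]
      rw [this, hlen, pv_take_set v a hlt]
      rw [show v.length - a = (v.length - (a + 1)) + 1 by omega, List.replicate_succ]
      simp

-- A's pad/truncate normalization equals pvConsume at the token count
theorem pv_norm_eq (fl : List Int) (n : Nat) :
    (if fl.length < n then fl ++ List.replicate (n - fl.length) 0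
     else if fl.length > n then fl.take n
     else fl)
    = pvConsume fl n := by
  unfold pvConsume
  rcases lt_trichotomy fl.length n with h | h | h
  · rw [if_pos h, List.take_of_length_le (by omega)]
  · rw [if_neg (by omega), if_neg (by omega), List.take_of_length_le (by omega),
      show n - fl.length = 0 by omega]
    simp
  · rw [if_neg (by omega), if_pos h, show n - fl.length = 0 by omega]
    simp

theorem pv_drop_tail (it : List Int) (k : Nat) :
    List.drop (k + 1) it = List.drop k it.tail := by
  cases it <;> simp

-- closed form of B's single-pass fold, for any starting state
theorem pv_fold_eq (toks : List String) : ∀ (it : List Int) (out : List String) (pend : List Int) (s : Bool),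
    toks.foldl
      (fun (st : List Int × List String × List Int × Bool) t =>
        let v := st.1.headD 0
        if PySem.Str.strIsdigit t then
          (st.1.tail, st.2.1 ++ st.2.2.1.map PySem.Int.toStr, [v], true)
        else
          (st.1.tail, st.2.1, st.2.2.1 ++ [v], st.2.2.2))
      (it, (out, pend, s))
    = match pvLastIdx toks with
      | none => (it.drop toks.length, (out, pend ++ pvConsume it toks.length, s))
      | some j => (it.drop toks.length,
          (out ++ (pend ++ pvConsume it j).map PySem.Int.toStr,
           pvConsume (it.drop j) (toks.length - j), true)) := by
  induction toks with
  | nil => intro it out pend s; simp [pvLastIdx, pvConsume_zero]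
  | cons t rest ih =>
      intro it out pend s
      simp only [List.foldl_cons, pvLastIdx]
      by_cases hd : PySem.Str.strIsdigit t
      · rw [if_pos hd, ih]
        cases hr : pvLastIdx rest with
        | none =>
            simp only [hd, if_true, List.length_cons]
            simp [pvConsume_zero, pvConsume_succ, pv_drop_tail, -List.drop_tail]
        | some j =>
            simp only [List.length_cons]
            rw [show rest.length + 1 - (j + 1) = rest.length - j by omega]
            simp [pvConsume_succ, pv_drop_tail, -List.drop_tail]
      · rw [if_neg hd, ih]
        cases hr : pvLastIdx rest with
        | none =>
            simp only [hd, List.length_cons]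
            simp [pvConsume_succ, pv_drop_tail, -List.drop_tail]
        | some j =>
            simp only [List.length_cons]
            rw [show rest.length + 1 - (j + 1) = rest.length - j by omega]
            simp [pvConsume_succ, pv_drop_tail, -List.drop_tail]

-- A's post-normalization tail, as a function of the token list and the normalized value list
def pvTailA (toks : List String) (v : List Int) : String :=
  let last_note : Option Int :=
    (PySem.List.enumerate toks).foldl
      (fun acc p => if PySem.Str.strIsdigit p.2 then some p.1 else acc) none
  let v2 :=
    match last_note with
    | none => v
    | some ln =>
        (PySem.List.pyRange ln (toks.length : Int)).foldl (fun l (i : Int) => l.set i.toNat 1) v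
  PySem.Str.join " " (v2.map PySem.Int.toStr)

-- B's fold + parts + join, as a function of the token list and the unconsumed value list
def pvTailB (toks : List String) (vals : List Int) : String :=
  let st := toks.foldl
    (fun (st : List Int × List String × List Int × Bool) t =>
      let v := st.1.headD 0
      if PySem.Str.strIsdigit t then
        (st.1.tail, st.2.1 ++ st.2.2.1.map PySem.Int.toStr, [v], true)
      else
        (st.1.tail, st.2.1, st.2.2.1 ++ [v], st.2.2.2))
    (vals, ([], [], false))
  let parts :=
    if st.2.2.2 then st.2.1 ++ List.replicate st.2.2.1.length "1"
    else st.2.2.1.map PySem.Int.toStr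
  PySem.Str.join " " parts

theorem pv_tail_eq (toks : List String) (vals : List Int) :
    pvTailA toks (pvConsume vals toks.length) = pvTailB toks vals := by
  unfold pvTailA pvTailB
  rw [pv_enum_foldl toks 0 none, pv_fold_eq toks vals [] [] false]
  cases h : pvLastIdx toks with
  | none => simp
  | some j =>
      have hj : j < toks.length := pv_lastIdx_lt toks j h
      simp only []
      rw [show ((0 : Int) + (j : Int)) = ((j : Nat) : Int) by ring]
      rw [show (toks.length : Int) = ((pvConsume vals toks.length).length : Int) by
        rw [pvConsume_length]]
      rw [pv_fill_eq ((pvConsume vals toks.length).length - j) j _ rfl]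
      rw [pvConsume_length, pvConsume_take j toks.length vals (by omega), pvConsume_length]
      simp [List.map_append, List.map_replicate, show PySem.Int.toStr (1 : Int) = "1" from rfl]

-- ===== VERDICT (by name: the statement is the Claim_ definition above) =====
theorem add_fermata_spec : Claim_equal_add_fermata := by
  intro encoded_voice fermata _ _
  unfold Spec_add_fermata add_fermata add_fermata_alt
  cases fermata with
  | none =>
      have : List.replicate (PySem.Str.split₀ encoded_voice).length (0 : Int)
          = pvConsume [] (PySem.Str.split₀ encoded_voice).length := by
        simp [pvConsume]
      simp only [this]
      exact pv_tail_eq (PySem.Str.split₀ encoded_voice) []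
  | some f =>
      simp only [pv_norm_eq]
      exact pv_tail_eq (PySem.Str.split₀ encoded_voice) _
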